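-- pv_equiv track=rewrite | github.com/smohapatra1/scripting | python/practice/start_again/2024/07052024/jogging_cats.py | joggingCats
-- ===== SOURCE A (Python) =====
-- def joggingCats(n,m,graph):
--     result = 0
--     visited = set([])
--     for source,destinations in graph.items():
--         destinationCount = {}
--         for x in destinations:
--             if x not in visited and x in graph:
--                 for y in graph[x]:
--                     if y not in visited:
--                         try:
--                             destinationCount[y] += 1
--                         except:
--                             destinationCount[y] = 1
--         for node,count in destinationCount.items():
--             if node != source:
--                 result+= count*(count-1)//2
--         visited.add(source)
--     return result
-- ===== SOURCE B (Python) =====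
-- def _pairs(ys):
--     # number of unordered pairs of equal elements, by direct pair enumeration:
--     # each element pairs with every equal element after it
--     total = 0
--     while ys:
--         head, ys = ys[0], ys[1:]
--         total += ys.count(head)
--     return total
--
--
-- def joggingCats(n, m, graph):
--     # No counting table at all: collect the stream of two-hop endpoints
--     # (excluding the source and visited nodes) and count equal pairs directly.
--     result = 0
--     visited = set()
--     for source, destinations in graph.items():
--         ys = []
--         for x in destinations:
--             if x not in visited and x in graph:
--                 for y in graph[x]:
--                     if y not in visited and y != source:
--                         ys.append(y)
--         result += _pairs(ys)
--         visited.add(source)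
--     return result
-- ===== Notes on version B (the rewrite author's own statement) =====
-- stated objective: alternative
-- what changed: B keeps no count table at all: per source it collects the filtered stream of two-hop endpoints and counts equal unordered pairs directly (each element paired with the equal elements after it), replacing A's dict-of-multiplicities plus a second pass summing count*(count-1)//2.
import Mathlib
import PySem

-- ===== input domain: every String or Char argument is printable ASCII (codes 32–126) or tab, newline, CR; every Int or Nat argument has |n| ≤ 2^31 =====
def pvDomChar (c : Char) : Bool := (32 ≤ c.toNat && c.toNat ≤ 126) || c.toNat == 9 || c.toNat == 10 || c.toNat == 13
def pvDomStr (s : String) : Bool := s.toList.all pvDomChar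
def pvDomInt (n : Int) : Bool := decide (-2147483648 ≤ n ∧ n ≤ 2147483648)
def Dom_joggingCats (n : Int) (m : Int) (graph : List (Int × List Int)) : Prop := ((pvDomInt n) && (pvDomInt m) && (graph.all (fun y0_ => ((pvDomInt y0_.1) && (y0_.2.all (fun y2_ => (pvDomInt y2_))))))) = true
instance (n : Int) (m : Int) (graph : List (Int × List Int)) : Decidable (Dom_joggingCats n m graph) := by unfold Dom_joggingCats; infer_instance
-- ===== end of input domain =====

-- B drops A's per-source counting dictionary and its binomial second pass entirely: it collects
-- the filtered two-hop endpoint stream and counts equal unordered pairs by direct enumeration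
-- (each element paired with the equal elements after it); objective: alternative algorithm.

-- ===== PORT A =====
-- The dict parameter `graph` arrives as an association list; `PySem.Dict.ofList` rebuilds the
-- Python dict (duplicate keys: last value, first position), and the loops run over its items.
-- `graph[x]` is only reached under the guard `x in graph`, so it is ported as `g.getD x []` (exact there).
def joggingCats (n : Int) (m : Int) (graph : List (Int × List Int)) : Int :=
  let g : PySem.Dict Int (List Int) := PySem.Dict.ofList graph
  (g.items.foldl (fun (st : Int × PySem.Set Int) sp =>
    let source := sp.1
    let dc : PySem.Dict Int Int := sp.2.foldl (fun dc x =>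
        if !(PySem.Set.contains st.2 x) && g.contains x then
          (g.getD x []).foldl (fun dc y =>
             if !(PySem.Set.contains st.2 y) then dc.modify y 0 (· + 1) else dc) dc
        else dc) PySem.Dict.empty
    let r := dc.items.foldl (fun r (p : Int × Int) =>
        if p.1 ≠ source then r + PySem.Int.floordiv (p.2 * (p.2 - 1)) 2 else r) st.1
    (r, PySem.Set.add st.2 source)) ((0 : Int), PySem.Set.empty)).1

-- ===== PORT B =====
-- Source B's `_pairs`: while ys: head, ys = ys[0], ys[1:]; total += ys.count(head)
def pvPairs (ys : List Int) (total : Int) : Int :=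
  match ys with
  | [] => total
  | head :: t => pvPairs t (total + (PySem.List.count t head : Int))

def joggingCats_alt (n : Int) (m : Int) (graph : List (Int × List Int)) : Int :=
  let g : PySem.Dict Int (List Int) := PySem.Dict.ofList graph
  (g.items.foldl (fun (st : Int × PySem.Set Int) sp =>
    let source := sp.1
    let ys : List Int := sp.2.foldl (fun ys x =>
        if !(PySem.Set.contains st.2 x) && g.contains x then
          (g.getD x []).foldl (fun (ys : List Int) y =>
             if !(PySem.Set.contains st.2 y) && y != source then ys ++ [y] else ys) ys
        else ys) []
    (st.1 + pvPairs ys 0, PySem.Set.add st.2 source)) ((0 : Int), PySem.Set.empty)).1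

-- ===== PRECONDITION & SPEC =====
def Spec_joggingCats (n : Int) (m : Int) (graph : List (Int × List Int)) (out : Int) : Prop := out = joggingCats_alt n m graph
instance (n : Int) (m : Int) (graph : List (Int × List Int)) (out : Int) : Decidable (Spec_joggingCats n m graph out) := by unfold Spec_joggingCats; infer_instance

-- ===== CLAIM (what is proved, stated in full; the proofs are below) =====
def Claim_equal_joggingCats : Prop := ∀ (n : Int) (m : Int) (graph : List (Int × List Int)), Dom_joggingCats n m graph → Spec_joggingCats n m graph (joggingCats n m graph)

-- ===== LEMMAS AND PROOFS =====

-- pvC2 c = c*(c-1)//2, the number of unordered pairs among c items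
def pvC2 (c : Int) : Int := PySem.Int.floordiv (c * (c - 1)) 2

-- per-source total: over the distinct 2-path endpoints k (except the source), pairs among the
-- occurrences of k in the endpoint stream ys
def pvS (source : Int) (ys : List Int) : Int :=
  ((PySem.Set.ofList ys).map (fun k => if k = source then 0 else pvC2 ((ys.count k : Int)))).sum

lemma pvC2_succ (c : Int) : pvC2 (c + 1) = pvC2 c + c := by
  unfold pvC2
  have h2 : (0:Int) < 2 := by norm_num
  rw [PySem.Int.floordiv_eq_ediv_of_pos h2, PySem.Int.floordiv_eq_ediv_of_pos h2,
    show (c + 1) * (c + 1 - 1) = c * (c - 1) + c * 2 by ring,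
    Int.add_mul_ediv_right _ _ (by norm_num : (2:Int) ≠ 0)]

-- a nested guarded double loop is a single fold over the flattened, filtered endpoint stream
lemma pvNested {σ : Type} (p q : Int → Bool) (g : Int → List Int) (step : σ → Int → σ)
    (dests : List Int) (init : σ) :
    dests.foldl (fun s x => if p x then (g x).foldl (fun s y => if q y then step s y else s) s else s) init
      = (dests.flatMap (fun x => if p x then (g x).filter q else [])).foldl step init := by
  induction dests generalizing init with
  | nil => rfl
  | cons a t ih =>
      simp only [List.foldl_cons, List.flatMap_cons, List.foldl_append]
      by_cases hp : p a
      · simp only [hp, if_true, ih]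
        rw [PySem.List.foldl_if_eq_foldl_filter q step]
      · simp only [hp, Bool.false_eq_true, if_false, List.foldl_nil, ih]

lemma pvSumMapSingle (l : List Int) (f f' : Int → Int) (y : Int) (hnd : l.Nodup) (hy : y ∈ l)
    (h1 : ∀ k ∈ l, k ≠ y → f' k = f k) :
    (l.map f').sum = (l.map f).sum + (f' y - f y) := by
  induction l with
  | nil => cases hy
  | cons a t ih =>
      simp only [List.map_cons, List.sum_cons]
      rcases List.mem_cons.mp hy with hya | hyt
      · subst hya
        have : t.map f' = t.map f := by
          apply List.map_congr_left
          intro k hk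
          exact h1 k (List.mem_cons_of_mem _ hk) (fun hk' => (List.nodup_cons.mp hnd).1 (hk' ▸ hk))
        rw [this]; ring
      · have hay : a ≠ y := fun h => (List.nodup_cons.mp hnd).1 (h ▸ hyt)
        rw [h1 a (List.mem_cons_self) hay,
          ih (List.nodup_cons.mp hnd).2 hyt (fun k hk => h1 k (List.mem_cons_of_mem _ hk))]
        ring

lemma pvS_append (source y : Int) (ys : List Int) :
    pvS source (ys ++ [y]) = pvS source ys + (if y ≠ source then (ys.count y : Int) else 0) := by
  have hofl : PySem.Set.ofList (ys ++ [y]) = PySem.Set.add (PySem.Set.ofList ys) y := by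
    simp [PySem.Set.ofList_eq_foldl, List.foldl_append]
  by_cases hy : y ∈ ys
  · have hmem : y ∈ PySem.Set.ofList ys := (PySem.Set.mem_ofList ys y).mpr hy
    have hadd : PySem.Set.add (PySem.Set.ofList ys) y = PySem.Set.ofList ys := by
      simp [PySem.Set.add, PySem.Set.contains, hmem]
    unfold pvS
    rw [hofl, hadd,
      pvSumMapSingle (PySem.Set.ofList ys)
        (fun k => if k = source then 0 else pvC2 ((ys.count k : Int)))
        (fun k => if k = source then 0 else pvC2 (((ys ++ [y]).count k : Int)))
        y (PySem.Set.nodup_ofList ys) hmem ?_]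
    · by_cases hs : y = source
      · simp [hs]
      · have hc : ((ys ++ [y]).count y : Int) = (ys.count y : Int) + 1 := by
          simp [List.count_append]
        have h1 : (if y = source then (0:Int) else pvC2 (((ys ++ [y]).count y : Int)))
            - (if y = source then 0 else pvC2 ((ys.count y : Int))) = (ys.count y : Int) := by
          simp only [if_neg hs, hc, pvC2_succ]; ring
        simp only [h1, if_pos (show y ≠ source from hs)]
    · intro k _ hk
      have hcnt : (ys ++ [y]).count k = ys.count k := by
        simp [List.count_append, Ne.symm hk]
      simp only [hcnt]
  · have hmem : y ∉ PySem.Set.ofList ys := fun h => hy ((PySem.Set.mem_ofList ys y).mp h)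
    have hadd : PySem.Set.add (PySem.Set.ofList ys) y = PySem.Set.ofList ys ++ [y] := by
      simp only [PySem.Set.add, PySem.Set.contains]
      rw [if_neg (by simpa using hmem)]
    unfold pvS
    rw [hofl, hadd, List.map_append, List.sum_append]
    have hterm : ([y].map (fun k => if k = source then 0 else pvC2 (((ys ++ [y]).count k : Int)))).sum = 0 := by
      have hc : ((ys ++ [y]).count y : Int) = 1 := by
        simp [List.count_append, List.count_eq_zero_of_not_mem hy]
      simp only [List.map_cons, List.map_nil, List.sum_cons, List.sum_nil, add_zero]
      by_cases hs : y = source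
      · simp [hs]
      · rw [if_neg hs, hc]
        unfold pvC2
        norm_num
    have hrest : (PySem.Set.ofList ys).map (fun k => if k = source then 0 else pvC2 (((ys ++ [y]).count k : Int)))
        = (PySem.Set.ofList ys).map (fun k => if k = source then 0 else pvC2 ((ys.count k : Int))) := by
      apply List.map_congr_left
      intro k hk
      have hk' : k ≠ y := fun h => hmem (h ▸ hk)
      have hcnt : (ys ++ [y]).count k = ys.count k := by
        simp [List.count_append, Ne.symm hk']
      simp only [hcnt]
    rw [hterm, hrest]
    have hcy : (ys.count y : Int) = 0 := by simp [List.count_eq_zero_of_not_mem hy]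
    simp [hcy]

-- B's pair counter: accumulator linearity, right-append step, and its value on a filtered stream
lemma pvPairs_add (l : List Int) (t c : Int) : pvPairs l (t + c) = pvPairs l t + c := by
  induction l generalizing t with
  | nil => rfl
  | cons a l ih =>
      simp only [pvPairs]
      rw [show t + c + (PySem.List.count l a : Int) = (t + (PySem.List.count l a : Int)) + c by ring, ih]

lemma pvPairs_append (l : List Int) (y : Int) (t : Int) :
    pvPairs (l ++ [y]) t = pvPairs l t + (l.count y : Int) := by
  induction l generalizing t with
  | nil => simp [pvPairs, PySem.List.count]
  | cons a l ih =>
      simp only [List.cons_append, pvPairs, ih]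
      have hc : (PySem.List.count (l ++ [y]) a : Int)
          = (PySem.List.count l a : Int) + (if a = y then (1:Int) else 0) := by
        by_cases hay : a = y
        · subst hay; simp [PySem.List.count_eq, List.count_append]
        · simp [PySem.List.count_eq, List.count_append, hay, Ne.symm hay]
      have hcy : ((a :: l).count y : Int) = (l.count y : Int) + (if a = y then (1:Int) else 0) := by
        by_cases hay : a = y
        · subst hay; simp
        · simp [hay]
      rw [hc,
        show t + ((PySem.List.count l a : Int) + (if a = y then (1:Int) else 0))
           = (t + (PySem.List.count l a : Int)) + (if a = y then (1:Int) else 0) by ring,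
        pvPairs_add, hcy]
      ring

-- counting equal pairs in the stream with source occurrences removed = A's binomial sum
lemma pvPairs_filter (source : Int) (ys : List Int) :
    pvPairs (ys.filter (fun y => y != source)) 0 = pvS source ys := by
  induction ys using List.reverseRecOn with
  | nil => simp [pvPairs, pvS, PySem.Set.ofList]
  | append_singleton ys y ih =>
      rw [List.filter_append, pvS_append]
      by_cases hs : y = source
      · simp [hs, ih]
      · have hf : [y].filter (fun y => y != source) = [y] := by simp [hs]
        rw [hf, pvPairs_append, ih, if_pos hs]
        have hcf : ((ys.filter (fun y => y != source)).count y : Int) = (ys.count y : Int) := by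
          rw [List.count_filter (by simp [hs])]
        rw [hcf]

-- the nested guarded loops of each port, specialised from pvNested
def pvYs (g : PySem.Dict Int (List Int)) (vis : PySem.Set Int) (dests : List Int) : List Int :=
  dests.flatMap (fun x =>
    if !(PySem.Set.contains vis x) && g.contains x then
      (g.getD x []).filter (fun y => !(PySem.Set.contains vis y))
    else [])

lemma pvNestedA (g : PySem.Dict Int (List Int)) (vis : PySem.Set Int) (dests : List Int)
    (init : PySem.Dict Int Int) :
    dests.foldl (fun dc x =>
        if !(PySem.Set.contains vis x) && g.contains x then
          (g.getD x []).foldl (fun dc y =>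
             if !(PySem.Set.contains vis y) then dc.modify y 0 (· + 1) else dc) dc
        else dc) init
      = (pvYs g vis dests).foldl (fun dc y => dc.modify y 0 (· + 1)) init :=
  pvNested _ _ _ _ _ _

-- A's second pass over the count table's items sums to pvS
lemma pvA_loop (source : Int) (ys : List Int) (r0 : Int) :
    (PySem.Dict.counter ys).items.foldl
        (fun r (p : Int × Int) => if p.1 ≠ source then r + PySem.Int.floordiv (p.2 * (p.2 - 1)) 2 else r) r0
      = r0 + pvS source ys := by
  rw [PySem.Dict.items_counter, List.foldl_map]
  rw [PySem.List.foldl_congr_mem _ _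
    (fun r k => r + (if k = source then 0 else pvC2 ((ys.count k : Int)))) _ ?_]
  · rw [PySem.List.foldl_add]
    rfl
  · intro acc k _
    by_cases hs : k = source
    · simp [hs]
    · simp [hs, pvC2]

-- B's nested collection loop builds exactly the source-filtered endpoint stream
lemma pvNestedB (g : PySem.Dict Int (List Int)) (vis : PySem.Set Int) (source : Int)
    (dests : List Int) :
    dests.foldl (fun ys x =>
        if !(PySem.Set.contains vis x) && g.contains x then
          (g.getD x []).foldl (fun (ys : List Int) y =>
             if !(PySem.Set.contains vis y) && y != source then ys ++ [y] else ys) ys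
        else ys) []
      = (pvYs g vis dests).filter (fun y => y != source) := by
  rw [pvNested (fun x => !(PySem.Set.contains vis x) && g.contains x)
      (fun y => !(PySem.Set.contains vis y) && y != source) (fun x => g.getD x [])
      (fun s y => s ++ [y]) dests []]
  rw [show ∀ (l : List Int), l.foldl (fun (s : List Int) y => s ++ [y]) [] = l from
    fun l => by induction l using List.reverseRecOn <;> simp_all]
  unfold pvYs
  rw [List.filter_flatMap]
  apply List.flatMap_congr  -- pointwise: filter past the if and fuse the two filters
  intro x _
  by_cases hp : (!(PySem.Set.contains vis x) && g.contains x) = true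
  · simp only [hp, if_true, List.filter_filter]
    exact List.filter_congr (fun a _ => by rw [Bool.and_comm])
  · simp only [hp, Bool.false_eq_true, if_false, List.filter_nil]

-- the two outer-loop bodies agree on every state and every (source, destinations) pair
lemma pvStep_eq (g : PySem.Dict Int (List Int)) (st : Int × PySem.Set Int) (sp : Int × List Int) :
    ((sp.2.foldl (fun dc x =>
        if !(PySem.Set.contains st.2 x) && g.contains x then
          (g.getD x []).foldl (fun dc y =>
             if !(PySem.Set.contains st.2 y) then dc.modify y 0 (· + 1) else dc) dc
        else dc) PySem.Dict.empty).items.foldl (fun r (p : Int × Int) =>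
            if p.1 ≠ sp.1 then r + PySem.Int.floordiv (p.2 * (p.2 - 1)) 2 else r) st.1,
      PySem.Set.add st.2 sp.1)
    = (st.1 + pvPairs (sp.2.foldl (fun ys x =>
          if !(PySem.Set.contains st.2 x) && g.contains x then
            (g.getD x []).foldl (fun (ys : List Int) y =>
               if !(PySem.Set.contains st.2 y) && y != sp.1 then ys ++ [y] else ys) ys
          else ys) []) 0,
        PySem.Set.add st.2 sp.1) := by
  rw [pvNestedA, ← PySem.Dict.counter_eq_foldl, pvA_loop, pvNestedB, pvPairs_filter]

-- ===== VERDICT (by name: the statement is the Claim_ definition above) =====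
theorem joggingCats_spec : Claim_equal_joggingCats := by
  intro n m graph _
  unfold Spec_joggingCats joggingCats joggingCats_alt
  simp only []
  rw [PySem.List.foldl_congr_mem _ _ _ _
    (fun st sp _ => pvStep_eq (PySem.Dict.ofList graph) st sp)]
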